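-- pv_equiv track=rewrite | github.com/liskos/gutnikov | варианты2025/шастинбахтиев/11/27.py | clasterization_2
-- ===== SOURCE A (Python) =====
-- def clasterization_2(data):
--     clasters = [[],[],[]]
--     for x, y in data:
--         if x < 0:
--             clasters[0].append([x, y])
--         elif x > 15:
--             clasters[1].append([x, y])
--         else:
--             clasters[2].append([x, y])
--     return clasters
-- ===== SOURCE B (Python) =====
-- def _key(p):
--     x = p[0]
--     if x < 0:
--         return 0
--     if x > 15:
--         return 1
--     return 2
--
-- def _span(rest, k):
--     j = 0
--     while j < len(rest) and _key(rest[j]) == k: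
--         j += 1
--     return [[x, y] for x, y in rest[:j]], rest[j:]
--
-- def clasterization_2(data):
--     s = sorted(data, key=_key)
--     g0, rest = _span(s, 0)
--     g1, rest = _span(rest, 1)
--     g2, rest = _span(rest, 2)
--     return [g0, g1, g2]
-- ===== Notes on version B (the rewrite author's own statement) =====
-- stated objective: alternative
-- what changed: Replaces A's single classifying pass over a 3-slot accumulator with a stable sort by cluster key followed by splitting the sorted list into three consecutive runs (sort-then-scan); stability preserves each cluster's insertion order.
import Mathlib
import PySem

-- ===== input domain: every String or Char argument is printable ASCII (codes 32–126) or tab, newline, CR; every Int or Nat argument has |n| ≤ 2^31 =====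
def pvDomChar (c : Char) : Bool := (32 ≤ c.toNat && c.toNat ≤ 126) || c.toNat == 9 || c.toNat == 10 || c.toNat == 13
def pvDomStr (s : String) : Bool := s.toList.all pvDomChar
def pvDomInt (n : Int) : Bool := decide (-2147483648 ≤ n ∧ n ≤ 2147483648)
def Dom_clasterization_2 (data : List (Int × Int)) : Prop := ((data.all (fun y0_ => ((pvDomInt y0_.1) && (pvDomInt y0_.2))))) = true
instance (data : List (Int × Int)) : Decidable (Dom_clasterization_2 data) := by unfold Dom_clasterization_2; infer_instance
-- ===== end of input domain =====

-- B replaces A's single classifying pass (mutable 3-slot accumulator) with a stable sort by cluster key followed by splitting the sorted list into three consecutive runs; stability preserves each cluster's order (alternative algorithm, not faster).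


-- ===== PORT A =====
-- one pass over data, appending each point to one of three cluster lists (the mutable `clasters` is the fold state)
def clasterization_2 (data : List (Int × Int)) : List (List (List Int)) :=
  let clasters :=
    data.foldl (fun (cs : List (List Int) × List (List Int) × List (List Int)) p =>
      let (x, y) := p
      if x < 0 then (cs.1 ++ [[x, y]], cs.2.1, cs.2.2)
      else if x > 15 then (cs.1, cs.2.1 ++ [[x, y]], cs.2.2)
      else (cs.1, cs.2.1, cs.2.2 ++ [[x, y]])) ([], [], [])
  [clasters.1, clasters.2.1, clasters.2.2]

-- ===== PORT B =====
-- _key(p): the cluster index 0/1/2 of a point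
def pvKeyB (p : Int × Int) : Int :=
  if p.1 < 0 then 0 else if p.1 > 15 then 1 else 2

-- the `while j < len(rest) and _key(rest[j]) == k: j += 1` loop of _span, as the obvious structural recursion
def pvSpanLen (rest : List (Int × Int)) (k : Int) : Nat :=
  match rest with
  | [] => 0
  | p :: t => if pvKeyB p == k then pvSpanLen t k + 1 else 0

-- _span(rest, k): the leading run of key k (as [x,y] lists) and the remainder, via slices rest[:j] / rest[j:]
def pvSpanB (rest : List (Int × Int)) (k : Int) : List (List Int) × List (Int × Int) :=
  let j := pvSpanLen rest k
  ((PySem.List.slice rest none (some (j : Int))).map (fun p => [p.1, p.2]),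
   PySem.List.slice rest (some (j : Int)) none)

-- stable sort by cluster key, then peel off the three consecutive runs
def clasterization_2_alt (data : List (Int × Int)) : List (List (List Int)) :=
  let s := PySem.List.sorted data pvKeyB false
  let r0 := pvSpanB s 0
  let r1 := pvSpanB r0.2 1
  let r2 := pvSpanB r1.2 2
  [r0.1, r1.1, r2.1]

-- ===== PRECONDITION & SPEC =====
def Spec_clasterization_2 (data : List (Int × Int)) (out : List (List (List Int))) : Prop := out = clasterization_2_alt data
instance (data : List (Int × Int)) (out : List (List (List Int))) : Decidable (Spec_clasterization_2 data out) := by unfold Spec_clasterization_2; infer_instance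

-- ===== CLAIM =====
def Claim_equal_clasterization_2 : Prop := ∀ (data : List (Int × Int)), Dom_clasterization_2 data → Spec_clasterization_2 data (clasterization_2 data)

-- ===== LEMMAS AND PROOFS =====

-- inserting past a prefix whose elements are all not-before x
theorem pvInsertBy_append {α : Type} (before : α → α → Bool) (x : α) (l1 l2 : List α)
    (h1 : ∀ y ∈ l1, before x y = false) :
    PySem.List.insertBy before x (l1 ++ l2) = l1 ++ PySem.List.insertBy before x l2 := by
  induction l1 with
  | nil => simp
  | cons y t ih =>
    have hy : before x y = false := h1 y (by simp)
    simp [PySem.List.insertBy, hy, ih (fun z hz => h1 z (by simp [hz]))]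

-- inserting at the front when the head (if any) is before-greater
theorem pvInsertBy_cons {α : Type} (before : α → α → Bool) (x : α) (l : List α)
    (h : ∀ z t, l = z :: t → before x z = true) :
    PySem.List.insertBy before x l = x :: l := by
  cases l with
  | nil => simp [PySem.List.insertBy]
  | cons z t => simp [PySem.List.insertBy, h z t rfl]

-- THE STABILITY FACT: stable sort by the 3-valued key is the concatenation of the three filters in order
theorem pvSorted3 (data : List (Int × Int)) :
    PySem.List.sorted data pvKeyB false =
      data.filter (fun p => pvKeyB p == 0) ++ data.filter (fun p => pvKeyB p == 1)
        ++ data.filter (fun p => pvKeyB p == 2) := by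
  induction data using List.reverseRecOn with
  | nil => simp [PySem.List.sorted]
  | append_singleton xs x ih =>
    have hs : PySem.List.sorted (xs ++ [x]) pvKeyB false
        = PySem.List.insertBy (fun a b => decide (pvKeyB a < pvKeyB b)) x
            (PySem.List.sorted xs pvKeyB false) := by
      rw [PySem.List.sorted_eq_foldl_insertBy, PySem.List.sorted_eq_foldl_insertBy]
      simp [List.foldl_append]
    rw [hs, ih]
    have hmem : ∀ (k : Int) (y : Int × Int),
        y ∈ xs.filter (fun p => pvKeyB p == k) → pvKeyB y = k := by
      intro k y hy
      have := (List.mem_filter.mp hy).2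
      simpa using this
    have hkx : pvKeyB x = 0 ∨ pvKeyB x = 1 ∨ pvKeyB x = 2 := by
      unfold pvKeyB; split_ifs <;> simp
    rcases hkx with hk | hk | hk
    · -- key 0: goes right after filter-0
      rw [List.append_assoc]
      rw [pvInsertBy_append _ x _ _ (by
        intro y hy
        have := hmem 0 y hy
        simp [hk, this])]
      rw [pvInsertBy_cons _ x _ (by
        intro z t hzt
        have hz : z ∈ xs.filter (fun p => pvKeyB p == 1) ++ xs.filter (fun p => pvKeyB p == 2) := by
          rw [hzt]; simp
        have : pvKeyB z = 1 ∨ pvKeyB z = 2 := by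
          rcases List.mem_append.mp hz with h | h
          · exact Or.inl (hmem 1 z h)
          · exact Or.inr (hmem 2 z h)
        rcases this with h | h <;> simp [hk, h])]
      simp [List.filter_append, hk, List.append_assoc]
    · -- key 1: after filter-1
      rw [pvInsertBy_append _ x _ _ (by
        intro y hy
        rcases List.mem_append.mp hy with h | h
        · have := hmem 0 y h; simp [hk, this]
        · have := hmem 1 y h; simp [hk, this])]
      rw [pvInsertBy_cons _ x _ (by
        intro z t hzt
        have hz : z ∈ xs.filter (fun p => pvKeyB p == 2) := by rw [hzt]; simp
        have := hmem 2 z hz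
        simp [hk, this])]
      simp [List.filter_append, hk, List.append_assoc]
    · -- key 2: at the very end
      rw [PySem.List.insertBy_of_forall_not_before _ x _ (by
        intro y hy
        rcases List.mem_append.mp hy with h | h
        · rcases List.mem_append.mp h with h' | h'
          · have := hmem 0 y h'; simp [hk, this]
          · have := hmem 1 y h'; simp [hk, this]
        · have := hmem 2 y h; simp [hk, this])]
      simp [List.filter_append, hk, List.append_assoc]

-- the while-loop length on a run followed by a differently-keyed (or empty) remainder
theorem pvSpanLen_append (l1 l2 : List (Int × Int)) (k : Int)
    (h1 : ∀ y ∈ l1, pvKeyB y = k)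
    (h2 : ∀ z t, l2 = z :: t → pvKeyB z ≠ k) :
    pvSpanLen (l1 ++ l2) k = l1.length := by
  induction l1 with
  | nil =>
    cases l2 with
    | nil => simp [pvSpanLen]
    | cons z t => simp [pvSpanLen, h2 z t rfl]
  | cons y t ih =>
    have hy := h1 y (by simp)
    simp [pvSpanLen, hy, ih (fun z hz => h1 z (by simp [hz]))]

-- _span on a run-plus-remainder: the mapped run and the remainder
theorem pvSpanB_append (l1 l2 : List (Int × Int)) (k : Int)
    (h1 : ∀ y ∈ l1, pvKeyB y = k)
    (h2 : ∀ z t, l2 = z :: t → pvKeyB z ≠ k) :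
    pvSpanB (l1 ++ l2) k = (l1.map (fun p => [p.1, p.2]), l2) := by
  simp only [pvSpanB, pvSpanLen_append l1 l2 k h1 h2,
    PySem.List.slice_to_natCast, PySem.List.slice_from_natCast]
  simp

-- loop invariant for A's fold: each accumulator followed by its filtered projection
theorem clasterization_2_foldl_inv (data : List (Int × Int))
    (a b c : List (List Int)) :
    data.foldl (fun (cs : List (List Int) × List (List Int) × List (List Int)) p =>
      let (x, y) := p
      if x < 0 then (cs.1 ++ [[x, y]], cs.2.1, cs.2.2)
      else if x > 15 then (cs.1, cs.2.1 ++ [[x, y]], cs.2.2)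
      else (cs.1, cs.2.1, cs.2.2 ++ [[x, y]])) (a, b, c)
    = (a ++ (data.filter (fun p => pvKeyB p == 0)).map (fun p => [p.1, p.2]),
       b ++ (data.filter (fun p => pvKeyB p == 1)).map (fun p => [p.1, p.2]),
       c ++ (data.filter (fun p => pvKeyB p == 2)).map (fun p => [p.1, p.2])) := by
  induction data generalizing a b c with
  | nil => simp
  | cons hd tl ih =>
    obtain ⟨x, y⟩ := hd
    by_cases h1 : x < 0
    · simp [List.foldl_cons, h1, ih, pvKeyB]
    · by_cases h2 : x > 15
      · simp [List.foldl_cons, h1, h2, ih, pvKeyB]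
      · simp [List.foldl_cons, h1, h2, ih, pvKeyB]

-- ===== VERDICT =====
theorem clasterization_2_spec : Claim_equal_clasterization_2 := by
  intro data _
  unfold Spec_clasterization_2
  have hmem : ∀ (k : Int) (y : Int × Int),
      y ∈ data.filter (fun p => pvKeyB p == k) → pvKeyB y = k := by
    intro k y hy
    have := (List.mem_filter.mp hy).2
    simpa using this
  have h0 : pvSpanB (data.filter (fun p => pvKeyB p == 0)
      ++ (data.filter (fun p => pvKeyB p == 1) ++ data.filter (fun p => pvKeyB p == 2))) 0
      = ((data.filter (fun p => pvKeyB p == 0)).map (fun p => [p.1, p.2]),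
         data.filter (fun p => pvKeyB p == 1) ++ data.filter (fun p => pvKeyB p == 2)) := by
    refine pvSpanB_append _ _ 0 (hmem 0) ?_
    intro z t hzt
    have hz : z ∈ data.filter (fun p => pvKeyB p == 1) ++ data.filter (fun p => pvKeyB p == 2) := by
      rw [hzt]; simp
    rcases List.mem_append.mp hz with h | h
    · simp [hmem 1 z h]
    · simp [hmem 2 z h]
  have h1 : pvSpanB (data.filter (fun p => pvKeyB p == 1) ++ data.filter (fun p => pvKeyB p == 2)) 1
      = ((data.filter (fun p => pvKeyB p == 1)).map (fun p => [p.1, p.2]),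
         data.filter (fun p => pvKeyB p == 2)) := by
    refine pvSpanB_append _ _ 1 (hmem 1) ?_
    intro z t hzt
    have hz : z ∈ data.filter (fun p => pvKeyB p == 2) := by rw [hzt]; simp
    simp [hmem 2 z hz]
  have h2 : pvSpanB (data.filter (fun p => pvKeyB p == 2)) 2
      = ((data.filter (fun p => pvKeyB p == 2)).map (fun p => [p.1, p.2]), []) := by
    have := pvSpanB_append (data.filter (fun p => pvKeyB p == 2)) [] 2 (hmem 2)
      (by intro z t h; simp at h)
    simpa using this
  have hsort := pvSorted3 data
  rw [List.append_assoc] at hsort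
  simp [clasterization_2, clasterization_2_alt, hsort, h0, h1, h2, clasterization_2_foldl_inv]
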